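-- pv_equiv track=rewrite | github.com/ray-hao/Random | LeetcodeDaily/2024-08-w3.py | minMoves
-- ===== SOURCE A (Python) =====
-- from typing import List
--
-- def minMoves(rooks: List[List[int]]) -> int:
--     gridSize = len(rooks)
--     rows = [i for i in range(gridSize)]
--     rookRows = [rook[1] for rook in rooks]
--     rookRows.sort()
--
--     cols = [i for i in range(gridSize)]
--     rookCols = [rook[0] for rook in rooks]
--     rookCols.sort()
--
--     moves = 0
--
--     for i in range(gridSize - 1, - 1, - 1):
--         moves += abs(rows[i] - rookRows[i])
--         moves += abs(cols[i] - rookCols[i])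
--
--     return moves
-- ===== SOURCE B (Python) =====
-- def minMoves(rooks):
--     total = 0
--     for axis in (1, 0):
--         vals = [r[axis] for r in rooks]
--         target = len(vals) - 1
--         while vals:
--             m = max(vals)
--             vals.remove(m)
--             total += abs(m - target)
--             target -= 1
--     return total
-- ===== Notes on version B (the rewrite author's own statement) =====
-- stated objective: alternative
-- what changed: Replaces A's sort-both-lists-then-index-pair loop by a greedy extraction: per axis it repeatedly takes the maximum remaining coordinate, removes it, and matches it to the largest unused target line, with one running total and no sorting, no index arrays and no backward index loop.
import Mathlib
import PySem

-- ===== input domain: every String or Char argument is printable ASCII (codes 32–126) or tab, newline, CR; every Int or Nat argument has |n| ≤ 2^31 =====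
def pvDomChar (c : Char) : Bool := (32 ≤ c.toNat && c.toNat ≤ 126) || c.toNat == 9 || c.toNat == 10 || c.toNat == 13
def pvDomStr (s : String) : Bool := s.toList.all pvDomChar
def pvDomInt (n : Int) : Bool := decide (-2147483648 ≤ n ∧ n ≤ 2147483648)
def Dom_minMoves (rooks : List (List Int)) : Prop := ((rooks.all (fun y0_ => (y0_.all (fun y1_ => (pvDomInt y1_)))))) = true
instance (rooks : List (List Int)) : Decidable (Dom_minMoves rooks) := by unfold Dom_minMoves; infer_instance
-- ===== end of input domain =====

-- B replaces A's sort-both-lists-then-backward-index-pair loop by a greedy max-extraction: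
-- per axis it repeatedly removes the maximum remaining coordinate and matches it to the
-- largest unused target line (objective: alternative; no speed claim).

-- ===== PORT A =====
def minMoves (rooks : List (List Int)) : Int :=
  let gridSize : Int := rooks.length
  let rows : List Int := PySem.List.pyRange 0 gridSize 1
  let rookRows : List Int :=
    PySem.List.sorted (rooks.map (fun rook => PySem.List.pyGetD rook 1 0)) (fun x => x) false
  let cols : List Int := PySem.List.pyRange 0 gridSize 1
  let rookCols : List Int :=
    PySem.List.sorted (rooks.map (fun rook => PySem.List.pyGetD rook 0 0)) (fun x => x) false
  (PySem.List.pyRange (gridSize - 1) (-1) (-1)).foldl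
    (fun moves i =>
      moves + |PySem.List.pyGetD rows i 0 - PySem.List.pyGetD rookRows i 0|
            + |PySem.List.pyGetD cols i 0 - PySem.List.pyGetD rookCols i 0|) 0

-- ===== PORT B =====
-- the 'while vals:' loop of Source B: extract the max, remove it, pay |m - target|
def bAxisLoop (vals : List Int) (target total : Int) : Int :=
  match hm : PySem.List.max? vals (fun x => x) with
  | none => total
  | some m =>
    match hr : PySem.List.remove? vals m with
    | none => total   -- unreachable: the max is a member; kept only for totality
    | some rest => bAxisLoop rest (target - 1) (total + |m - target|)
termination_by vals.length
decreasing_by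
  have hmem : m ∈ vals := PySem.List.max?_mem hm
  have he : some rest = some (vals.erase m) := by
    rw [← hr, PySem.List.remove?_eq_some_erase vals m hmem]
  have hrest : rest = vals.erase m := Option.some.inj he
  have hpos : 0 < vals.length := List.length_pos_of_mem hmem
  have hl : (vals.erase m).length = vals.length - 1 := List.length_erase_of_mem hmem
  rw [hrest, hl]; omega

def minMoves_alt (rooks : List (List Int)) : Int :=
  let vals1 := rooks.map (fun rook => PySem.List.pyGetD rook 1 0)
  let t1 := bAxisLoop vals1 ((vals1.length : Int) - 1) 0
  let vals0 := rooks.map (fun rook => PySem.List.pyGetD rook 0 0)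
  bAxisLoop vals0 ((vals0.length : Int) - 1) t1

-- ===== PRECONDITION & SPEC =====
-- Pre_ excludes only rooks with fewer than 2 coordinates, on which A raises IndexError.
def Pre_minMoves (rooks : List (List Int)) : Prop := ∀ r ∈ rooks, 2 ≤ r.length
instance (rooks : List (List Int)) : Decidable (Pre_minMoves rooks) := by
  unfold Pre_minMoves; infer_instance
def pvWitness_minMoves : List (List Int) := [[0, 1], [1, 0]]

def Spec_minMoves (rooks : List (List Int)) (out : Int) : Prop := out = minMoves_alt rooks
instance (rooks : List (List Int)) (out : Int) : Decidable (Spec_minMoves rooks out) := by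
  unfold Spec_minMoves; infer_instance

-- ===== CLAIM (what is proved, stated in full; the proofs are below) =====
def Claim_equal_minMoves : Prop :=
  ∀ (rooks : List (List Int)), Dom_minMoves rooks → Pre_minMoves rooks →
    Spec_minMoves rooks (minMoves rooks)

-- ===== LEMMAS AND PROOFS =====

-- Σ_k |s_k - (i0 + k)|
def T (s : List Int) (i0 : Int) : Int :=
  ((PySem.List.enumerate s i0).map (fun p => |p.2 - p.1|)).sum

theorem T_append (xs ys : List Int) (i : Int) :
    T (xs ++ ys) i = T xs i + T ys (i + xs.length) := by
  simp [T, PySem.List.enumerate_append]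

theorem sum_abs_eq_T (s : List Int) (n : Int) (h : (s.length : Int) = n) :
    ((PySem.List.pyRange 0 n 1).map
      (fun i => |PySem.List.pyGetD (PySem.List.pyRange 0 n 1) i 0 - PySem.List.pyGetD s i 0|)).sum
    = T s 0 := by
  subst h
  rw [T, PySem.List.enumerate_eq_map_pyRange s (0 : Int), List.map_map]
  simp only [PySem.List.len_eq]
  apply congrArg List.sum
  apply List.map_congr_left
  intro i hi
  rw [PySem.List.mem_pyRange_one] at hi
  have hi2 : i < ((PySem.List.pyRange 0 ((s.length : Nat) : Int) 1).length : Int) := by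
    rw [PySem.List.length_pyRange_one]; omega
  simp only [Function.comp_apply]
  rw [PySem.List.pyGetD_eq_getElem _ _ hi.1 hi2, PySem.List.getElem_pyRange_one]
  rw [Int.toNat_of_nonneg hi.1, zero_add, abs_sub_comm]

theorem foldl_add2 (l : List Int) (f g : Int → Int) : ∀ (a : Int),
    l.foldl (fun acc x => acc + f x + g x) a = a + (l.map f).sum + (l.map g).sum := by
  induction l with
  | nil => intro a; simp
  | cons x xs ih => intro a; simp only [List.foldl_cons, ih, List.map_cons, List.sum_cons]; ring

theorem A_eval (rooks : List (List Int)) :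
    minMoves rooks
    = T (PySem.List.sorted (rooks.map (fun rook => PySem.List.pyGetD rook 1 0)) (fun x => x) false) 0
    + T (PySem.List.sorted (rooks.map (fun rook => PySem.List.pyGetD rook 0 0)) (fun x => x) false) 0 := by
  simp only [minMoves]
  rw [PySem.List.pyRange_neg_one_eq_reverse]
  have e1 : (-1 : Int) + 1 = 0 := by norm_num
  have e2 : ((rooks.length : Int) - 1) + 1 = (rooks.length : Int) := by ring
  rw [e1, e2, foldl_add2, zero_add, List.map_reverse, List.map_reverse,
    List.sum_reverse, List.sum_reverse,
    sum_abs_eq_T _ _ (by rw [PySem.List.length_sorted, List.length_map]),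
    sum_abs_eq_T _ _ (by rw [PySem.List.length_sorted, List.length_map])]

-- removing the maximum from a list removes the last element of its sorted version
theorem sorted_erase_max (vals : List Int) (m : Int)
    (hm : PySem.List.max? vals (fun x => x) = some m) :
    PySem.List.sorted vals (fun x => x) false
    = PySem.List.sorted (vals.erase m) (fun x => x) false ++ [m] := by
  have hmem : m ∈ vals := PySem.List.max?_mem hm
  apply PySem.List.sorted_id_eq_of_perm_of_pairwise
  · have h1 : (PySem.List.sorted (vals.erase m) (fun x => x) false ++ [m]).Perm
        (vals.erase m ++ [m]) := (PySem.List.sorted_perm _ _ _).append_right _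
    have h2 : (vals.erase m ++ [m]).Perm vals :=
      ((List.perm_append_singleton _ _).trans (List.perm_cons_erase hmem).symm)
    exact h1.trans h2
  · rw [List.pairwise_append]
    refine ⟨PySem.List.sorted_pairwise _ _, List.pairwise_singleton _ _, ?_⟩
    intro x hx y hy
    rw [List.mem_singleton] at hy; subst hy
    have hx' : x ∈ vals := (vals.erase_subset) ((PySem.List.mem_sorted _ _ _ _).mp hx)
    exact PySem.List.max?_isMax hm x hx'

theorem bAxisLoop_eq (n : Nat) : ∀ (vals : List Int), vals.length = n → ∀ (t acc : Int),
    bAxisLoop vals t acc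
    = acc + T (PySem.List.sorted vals (fun x => x) false) (t - vals.length + 1) := by
  induction n with
  | zero =>
    intro vals hv t acc
    rw [List.length_eq_zero_iff] at hv; subst hv
    rw [bAxisLoop.eq_def]
    split
    · simp [T, PySem.List.sorted]
    · next m hm => exact absurd (PySem.List.max?_mem hm) (List.not_mem_nil)
  | succ k ih =>
    intro vals hv t acc
    rw [bAxisLoop.eq_def]
    split
    · next h =>
      exfalso
      cases vals with
      | nil => simp at hv
      | cons x xs => rw [PySem.List.max?_id_cons] at h; cases h
    · next m hm =>
      have hmem : m ∈ vals := PySem.List.max?_mem hm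
      split
      · next hr =>
        rw [PySem.List.remove?_eq_some_erase vals m hmem] at hr; cases hr
      · next rest hr =>
        have hrest : rest = vals.erase m := by
          rw [PySem.List.remove?_eq_some_erase vals m hmem] at hr
          exact (Option.some.inj hr).symm
        subst hrest
        have hlen : (vals.erase m).length = k := by
          rw [List.length_erase_of_mem hmem, hv]; omega
        rw [ih _ hlen, sorted_erase_max vals m hm, T_append]
        have hslen : ((PySem.List.sorted (vals.erase m) (fun x => x) false).length : Int)
            = (k : Int) := by
          rw [PySem.List.length_sorted, hlen]
        rw [hslen, hv, hlen]
        simp only [T, PySem.List.enumerate, List.map, List.sum_cons, List.sum_nil]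
        push_cast
        rw [show t - (↑k + 1) + 1 + ↑k = t by ring]
        ring_nf

theorem minMoves_spec : Claim_equal_minMoves := by
  intro rooks _ _
  show minMoves rooks = minMoves_alt rooks
  rw [A_eval]
  simp only [minMoves_alt]
  rw [bAxisLoop_eq _ _ rfl, bAxisLoop_eq _ _ rfl]
  simp only [List.length_map]
  have h0 : ((rooks.length : Int) - 1 - (rooks.length : Int) + 1) = 0 := by ring
  rw [h0]
  ring
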